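-- pv_equiv track=rewrite | github.com/choderalab/missense-kinase-toolkit | missense_kinase_toolkit/databases/mkt/databases/utils.py | create_strsplit_list
-- ===== SOURCE A (Python) =====
-- def try_except_split_concat_str(
--     str_in: str,
--     idx1: int,
--     idx2: int,
--     delim: str = "-",
-- ) -> str:
--     """
--     Split str_in on delim with exception handling.
--
--     Parameters
--     ----------
--     str_in : str
--         Input string
--     idx1 : int
--         Starting index
--     idx2 : int
--         Ending index
--     delim : str
--         Delimiter to split on
--
--     Returns
--     -------
--     str
--         Concatenated string containing the strings split on delim from idx1:idx2
--
--     """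
--     try:
--         str_out = ("").join(
--             [str_in.split(delim)[i].upper() for i in range(idx1, idx2 + 1)]
--         )
--         return str_out
--     except (IndexError, AttributeError):
--         try:
--             str_out = str_in.split(delim)[0]
--             return str_out
--         except AttributeError:
--             str_out = str_in
--             return str_out
--
-- def create_strsplit_list(
--     list_in: list[str],
--     idx_start: int = 0,
--     idx_end: int = 2,
-- ) -> list[str]:
--     """
--     Split list or Series of strings on delim with exception handling.
--
--     Parameters
--     ----------
--     list_in : list[str]
--         List of strings to split
--     idx_start : int
--         Starting index
--     idx_end : int
--         Ending index
--
--     Returns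
--     -------
--     list[str]
--         List of concatenated strings split on delim from idx_start:idx_end
--
--     """
--     return [
--         [
--             try_except_split_concat_str(x, idx_start, i)
--             for i in range(idx_start, idx_end + 1)
--         ]
--         for x in list_in
--     ]
-- ===== SOURCE B (Python) =====
-- def create_strsplit_list(list_in, idx_start=0, idx_end=2):
--     """Split each string once and build its progressive uppercase concatenations in one pass."""
--     out = []
--     for x in list_in:
--         parts = x.split("-")
--         acc = ""
--         row = []
--         for i in range(idx_start, idx_end + 1):
--             if 0 <= i < len(parts):
--                 acc += parts[i].upper()
--                 row.append(acc)
--             else: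
--                 row.append(parts[0])
--         out.append(row)
--     return out
-- ===== Notes on version B (the rewrite author's own statement) =====
-- stated objective: alternative
-- what changed: B splits each string once and builds each row's progressive uppercase concatenations incrementally with a running accumulator instead of re-splitting the string and re-joining the whole prefix from scratch (inside an exception handler) for every output cell; Pre_ excludes negative idx_start, an unused corner (defaults are 0 and 2) where A's value comes from Python's negative-index wraparound interacting with its exception fallback, while B indexes from the front only. Intended as faster (one split and incremental prefixes per string); …
-- outside the precondition, e.g. on create_strsplit_list(['a-b'], -1, -1): A returns [['B']], B returns [['a']]; on create_strsplit_list(['a-b'], -5, -4): A returns [['a', 'a']], B returns [['a', 'a']]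
import Mathlib
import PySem

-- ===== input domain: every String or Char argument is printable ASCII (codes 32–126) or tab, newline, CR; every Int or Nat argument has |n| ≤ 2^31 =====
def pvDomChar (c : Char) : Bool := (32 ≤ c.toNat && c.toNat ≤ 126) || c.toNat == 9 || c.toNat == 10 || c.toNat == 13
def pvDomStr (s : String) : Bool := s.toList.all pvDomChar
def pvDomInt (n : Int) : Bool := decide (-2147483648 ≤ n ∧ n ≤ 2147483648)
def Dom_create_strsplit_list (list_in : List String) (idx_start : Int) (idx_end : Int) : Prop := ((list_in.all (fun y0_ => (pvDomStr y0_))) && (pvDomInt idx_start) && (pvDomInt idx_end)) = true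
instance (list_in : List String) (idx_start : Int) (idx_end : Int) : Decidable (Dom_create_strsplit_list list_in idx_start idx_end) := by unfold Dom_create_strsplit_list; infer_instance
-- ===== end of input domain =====

-- B splits each string once and builds the row's prefix concatenations incrementally in one pass
-- with a running accumulator (objective: alternative single-pass strategy; same measured cost).

-- ===== PORT A =====
-- helper: try_except_split_concat_str (delim is "-" at every call site)
def try_except_split_concat_str (str_in : String) (idx1 : Int) (idx2 : Int) : String :=
  let parts := (PySem.Str.split? str_in "-").getD []  -- sep "-" ≠ "", so split? is never none
  match (PySem.List.pyRange idx1 (idx2 + 1) 1).mapM (fun i => PySem.List.pyGet? parts i) with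
  | some pieces => PySem.Str.join "" (pieces.map PySem.Str.upper)
  | none =>  -- IndexError branch: parts[0]; split never returns [], so this indexing succeeds
             -- (the .getD str_in default mirrors the unreachable AttributeError fallback)
      (PySem.List.pyGet? parts 0).getD str_in

def create_strsplit_list (list_in : List String) (idx_start : Int) (idx_end : Int) : List (List String) :=
  list_in.map (fun x =>
    (PySem.List.pyRange idx_start (idx_end + 1) 1).map
      (fun i => try_except_split_concat_str x idx_start i))

-- ===== PORT B =====
-- the inner 'for i in range(idx_start, idx_end+1)' loop of Source B, carrying acc
def altLoop (parts : List String) (fb : String) (acc : String) (i : Int) : Nat → List String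
  | 0 => []
  | n + 1 =>
    if 0 ≤ i ∧ i < (parts.length : Int) then
      let acc' := acc ++ PySem.Str.upper (PySem.List.pyGetD parts i "")
      acc' :: altLoop parts fb acc' (i + 1) n
    else
      fb :: altLoop parts fb acc (i + 1) n

def create_strsplit_list_alt (list_in : List String) (idx_start : Int) (idx_end : Int) : List (List String) :=
  list_in.map (fun x =>
    let parts := (PySem.Str.split? x "-").getD []  -- split once per string
    let fb := (PySem.List.pyGet? parts 0).getD x   -- parts[0]; split never returns []
    altLoop parts fb "" idx_start (idx_end + 1 - idx_start).toNat)

-- ===== PRECONDITION & SPEC =====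
-- Pre_ excludes negative idx_start (A still returns there): that corner's value comes from
-- Python's negative-index wraparound interacting with A's exception fallback — an unspecified
-- corner no caller uses (defaults are 0 and 2) — while B indexes from the front only.
def Pre_create_strsplit_list (list_in : List String) (idx_start : Int) (idx_end : Int) : Prop :=
  0 ≤ idx_start
instance (list_in : List String) (idx_start : Int) (idx_end : Int) : Decidable (Pre_create_strsplit_list list_in idx_start idx_end) := by unfold Pre_create_strsplit_list; infer_instance

def pvWitness_create_strsplit_list : List String × Int × Int := (["abc-def-x", "q"], 0, 2)

def Spec_create_strsplit_list (list_in : List String) (idx_start : Int) (idx_end : Int) (out : List (List String)) : Prop := out = create_strsplit_list_alt list_in idx_start idx_end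
instance (list_in : List String) (idx_start : Int) (idx_end : Int) (out : List (List String)) : Decidable (Spec_create_strsplit_list list_in idx_start idx_end out) := by unfold Spec_create_strsplit_list; infer_instance

-- ===== CLAIM (what is proved, stated in full; the proofs are below) =====
def Claim_equal_create_strsplit_list : Prop := ∀ (list_in : List String) (idx_start : Int) (idx_end : Int), Dom_create_strsplit_list list_in idx_start idx_end → Pre_create_strsplit_list list_in idx_start idx_end → Spec_create_strsplit_list list_in idx_start idx_end (create_strsplit_list list_in idx_start idx_end)

-- ===== LEMMAS AND PROOFS =====

-- the progressive concatenation "".join(parts[k].upper() for k in range(a, b))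
def segStr (parts : List String) (a b : Int) : String :=
  PySem.Str.join "" ((PySem.List.pyRange a b 1).map
    (fun k => PySem.Str.upper (PySem.List.pyGetD parts k "")))

lemma chars_join_append_singleton (ls : List (List Char)) (cs : List Char) :
    PySem.Chars.join [] (ls ++ [cs]) = PySem.Chars.join [] ls ++ cs := by
  induction ls with
  | nil => simp [PySem.Chars.join_nil, PySem.Chars.join_singleton]
  | cons a t ih =>
    cases t with
    | nil => simp [PySem.Chars.join_singleton, PySem.Chars.join_cons_cons]
    | cons b r => simp [PySem.Chars.join_cons_cons] at ih ⊢; simp [ih]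

lemma str_join_append_singleton (l : List String) (s : String) :
    PySem.Str.join "" (l ++ [s]) = PySem.Str.join "" l ++ s := by
  simp [PySem.Str.join, chars_join_append_singleton, String.ofList_append, String.ofList_toList]

lemma str_join_nil : PySem.Str.join "" ([] : List String) = "" := by decide

lemma mapM_eq_some_of_all {α β : Type} (f : α → Option β) (g : α → β) (l : List α)
    (h : ∀ a ∈ l, f a = some (g a)) : l.mapM f = some (l.map g) := by
  induction l with
  | nil => rfl
  | cons a l ih => simp_all [List.mapM_cons]

lemma mapM_eq_none_of_mem {α β : Type} (f : α → Option β) (l : List α) (a : α)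
    (ha : a ∈ l) (h : f a = none) : l.mapM f = none := by
  induction l with
  | nil => simp at ha
  | cons b l ih =>
    rcases List.mem_cons.mp ha with h1 | h2
    · simp [List.mapM_cons, h1 ▸ h]
    · have hn := ih h2
      simp [List.mapM_cons, hn]

lemma pyGet?_eq_some_getD (parts : List String) (k : Int)
    (h1 : -(parts.length : Int) ≤ k) (h2 : k < (parts.length : Int)) :
    PySem.List.pyGet? parts k = some (PySem.List.pyGetD parts k "") := by
  cases h : PySem.List.pyGet? parts k with
  | none =>
    rw [PySem.List.pyGet?_eq_none_iff] at h
    exact absurd ⟨h1, h2⟩ h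
  | some v => simp [PySem.List.pyGetD, h]

-- characterisation of A's helper for 0 ≤ idx1 ≤ j: success iff j < len
lemma tryOne_eq (x : String) (i1 j : Int) (h0 : 0 ≤ i1) (hij : i1 ≤ j) :
    try_except_split_concat_str x i1 j =
      (let parts := (PySem.Str.split? x "-").getD []
       if j < (parts.length : Int)
       then segStr parts i1 (j + 1)
       else (PySem.List.pyGet? parts 0).getD x) := by
  simp only [try_except_split_concat_str]
  set parts := (PySem.Str.split? x "-").getD [] with hp
  by_cases h : j < (parts.length : Int)
  · have hm : (PySem.List.pyRange i1 (j + 1) 1).mapM (fun i => PySem.List.pyGet? parts i)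
        = some ((PySem.List.pyRange i1 (j + 1) 1).map (fun k => PySem.List.pyGetD parts k "")) := by
      apply mapM_eq_some_of_all
      intro a ha
      rw [PySem.List.mem_pyRange_one] at ha
      exact pyGet?_eq_some_getD parts a (by omega) (by omega)
    rw [hm]
    simp [h, segStr, List.map_map, Function.comp_def]
  · have hm : (PySem.List.pyRange i1 (j + 1) 1).mapM (fun i => PySem.List.pyGet? parts i) = none := by
      apply mapM_eq_none_of_mem _ _ j
      · rw [PySem.List.mem_pyRange_one]; omega
      · rw [PySem.List.pyGet?_eq_none_iff]
        intro hr
        exact h hr.2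
    rw [hm]
    simp [h]

lemma segStr_succ (parts : List String) (i1 j : Int) (h : i1 ≤ j) :
    segStr parts i1 (j + 1) = segStr parts i1 j ++ PySem.Str.upper (PySem.List.pyGetD parts j "") := by
  simp only [segStr]
  rw [PySem.List.pyRange_one_succ_right h, List.map_append, List.map_singleton,
    str_join_append_singleton]

-- loop invariant for B's inner loop (only needed for non-negative start indices)
lemma altLoop_eq (parts : List String) (fb : String) (i1 : Int) (h0 : 0 ≤ i1) :
    ∀ (n : Nat) (j : Int) (acc : String), i1 ≤ j →
      (j ≤ (parts.length : Int) → acc = segStr parts i1 j) →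
      altLoop parts fb acc j n =
        (PySem.List.pyRange j (j + n) 1).map
          (fun i => if i < (parts.length : Int) then segStr parts i1 (i + 1) else fb) := by
  intro n
  induction n with
  | zero =>
    intro j acc _ _
    rw [PySem.List.pyRange_one_eq_nil (by omega : j + ((0:Nat):Int) ≤ j)]; simp [altLoop]
  | succ n ih =>
    intro j acc hij hacc
    rw [PySem.List.pyRange_one_cons (by push_cast; omega : j < j + ((n:Nat) + 1 : Nat))]
    simp only [altLoop]
    by_cases hc : j < (parts.length : Int)
    · rw [if_pos ⟨by omega, hc⟩, List.map_cons]
      have hacc' : acc = segStr parts i1 j := hacc (by omega)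
      have hstep : acc ++ PySem.Str.upper (PySem.List.pyGetD parts j "") = segStr parts i1 (j + 1) := by
        rw [hacc', ← segStr_succ parts i1 j hij]
      rw [if_pos hc]
      refine congrArg₂ _ hstep ?_
      have := ih (j + 1) (acc ++ PySem.Str.upper (PySem.List.pyGetD parts j "")) (by omega)
        (fun _ => hstep)
      rw [this, show j + 1 + (n : Int) = j + (((n : Nat) + 1 : Nat) : Int) by push_cast; ring]
    · rw [if_neg (by omega : ¬ (0 ≤ j ∧ j < (parts.length : Int))), List.map_cons, if_neg hc]
      have hacc2 : j + 1 ≤ (parts.length : Int) → acc = segStr parts i1 (j + 1) := by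
        intro h2; omega
      have := ih (j + 1) acc (by omega) hacc2
      rw [this, show j + 1 + (n : Int) = j + (((n : Nat) + 1 : Nat) : Int) by push_cast; ring]

-- ===== VERDICT (by name: the statement is the Claim_ definition above) =====
theorem create_strsplit_list_spec : Claim_equal_create_strsplit_list := by
  intro list_in idx_start idx_end _ hpre
  show create_strsplit_list list_in idx_start idx_end = create_strsplit_list_alt list_in idx_start idx_end
  have h0 : 0 ≤ idx_start := hpre
  simp only [create_strsplit_list, create_strsplit_list_alt]
  apply List.map_congr_left
  intro x _
  set parts := (PySem.Str.split? x "-").getD [] with hp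
  set fb := (PySem.List.pyGet? parts 0).getD x with hfb
  have hA : (PySem.List.pyRange idx_start (idx_end + 1) 1).map
      (fun i => try_except_split_concat_str x idx_start i) =
      (PySem.List.pyRange idx_start (idx_end + 1) 1).map
        (fun i => if i < (parts.length : Int)
                  then segStr parts idx_start (i + 1) else fb) := by
    apply List.map_congr_left
    intro i hi
    rw [PySem.List.mem_pyRange_one] at hi
    rw [tryOne_eq x idx_start i h0 hi.1]
  rw [hA]
  by_cases hle : idx_start ≤ idx_end + 1
  · have hrange : idx_start + ((idx_end + 1 - idx_start).toNat : Int) = idx_end + 1 := by omega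
    rw [altLoop_eq parts fb idx_start h0 _ idx_start "" le_rfl
      (fun _ => by simp [segStr, PySem.List.pyRange_one_eq_nil le_rfl, str_join_nil]), hrange]
  · rw [altLoop_eq parts fb idx_start h0 _ idx_start "" le_rfl
      (fun _ => by simp [segStr, PySem.List.pyRange_one_eq_nil le_rfl, str_join_nil])]
    have h0' : (idx_end + 1 - idx_start).toNat = 0 := by omega
    rw [h0']
    simp [PySem.List.pyRange_one_eq_nil (by omega : idx_end + 1 ≤ idx_start)]
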